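-- pv_equiv track=rewrite | github.com/ysu6691/Algorithm | Programmers/Lv3/PG_인사고과.py | solution
-- ===== SOURCE A (Python) =====
-- def solution(scores):
--
--     sorted_scores = sorted(scores[1:], key=lambda x: (-x[0], x[1]))
--
--     target_score = scores[0]
--     total_score = sum(target_score)
--     max_score = -1
--     answer = 1
--     for score in sorted_scores:
--         if score[0] > target_score[0] and score[1] > target_score[1]:
--             return -1
--         if score[1] >= max_score:
--             max_score = score[1]
--             if sum(score) > total_score:
--                 answer += 1
--
--     return answer
-- ===== SOURCE B (Python) =====
-- def solution(scores):
--     # return-value equivalent to the sort-and-sweep original, without sorting: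
--     # an employee is counted iff its total beats the target's and its second score
--     # reaches the best second score among strictly-higher-first rivals (floored at
--     # -1, the sweep's initial running maximum).
--     target, others = scores[0], scores[1:]
--     total = sum(target)
--     if any(s[0] > target[0] and s[1] > target[1] for s in others):
--         return -1
--     answer = 1
--     for s in others:
--         bar = max([t[1] for t in others if t[0] > s[0]] + [-1])
--         if s[1] >= bar and sum(s) > total:
--             answer += 1
--     return answer
-- ===== Notes on version B (the rewrite author's own statement) =====
-- stated objective: alternative
-- what changed: B drops A's sort and running-max sweep entirely: it does an independent domination scan of the unsorted tail for the -1 case, then counts each tail employee by a direct per-element criterion (total above the target's and second score at least the best second score among strictly-higher-first rivals, floored at -1 like A's initial running maximum) instead of A's early-returning single pass over the sorted list.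
import Mathlib
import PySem

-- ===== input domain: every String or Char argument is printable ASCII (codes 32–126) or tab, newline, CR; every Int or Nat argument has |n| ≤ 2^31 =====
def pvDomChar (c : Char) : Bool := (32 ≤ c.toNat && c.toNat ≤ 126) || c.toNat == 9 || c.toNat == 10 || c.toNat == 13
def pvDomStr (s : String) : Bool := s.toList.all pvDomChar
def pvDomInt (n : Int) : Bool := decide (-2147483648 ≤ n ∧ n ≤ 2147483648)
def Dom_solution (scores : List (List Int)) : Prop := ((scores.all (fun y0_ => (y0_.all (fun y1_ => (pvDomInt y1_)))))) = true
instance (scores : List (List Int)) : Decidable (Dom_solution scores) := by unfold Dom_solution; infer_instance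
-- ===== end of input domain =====

-- B replaces A's sort-and-sweep by an unsorted domination scan plus a quadratic
-- per-element count; the -1 floor in B's criterion reproduces A's initial running
-- maximum (objective: alternative algorithm, no sort, no accumulator).

-- ===== PORT A =====
-- the for-loop with its early 'return -1' and the (max_score, answer) state
def solLoopA (t0 t1 total : Int) : List (List Int) → Int → Int → Int
  | [], _, answer => answer
  | s :: rest, maxScore, answer =>
    if PySem.List.pyGetD s 0 0 > t0 ∧ PySem.List.pyGetD s 1 0 > t1 then -1
    else if PySem.List.pyGetD s 1 0 ≥ maxScore then
      if s.sum > total then solLoopA t0 t1 total rest (PySem.List.pyGetD s 1 0) (answer + 1)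
      else solLoopA t0 t1 total rest (PySem.List.pyGetD s 1 0) answer
    else solLoopA t0 t1 total rest maxScore answer

def solution (scores : List (List Int)) : Int :=
  let sorted_scores := PySem.List.sorted2 (PySem.List.slice scores (some 1) none)
      (fun x => -(PySem.List.pyGetD x 0 0)) (fun x => PySem.List.pyGetD x 1 0)
  let target_score := PySem.List.pyGetD scores 0 []
  let total_score := target_score.sum
  solLoopA (PySem.List.pyGetD target_score 0 0) (PySem.List.pyGetD target_score 1 0)
    total_score sorted_scores (-1) 1

-- ===== PORT B =====
-- Source B: 'max([t[1] for t in others if t[0] > s[0]] + [-1])'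
def barB (others : List (List Int)) (s : List Int) : Int :=
  (PySem.List.max? (((others.filter (fun t =>
      decide (PySem.List.pyGetD t 0 0 > PySem.List.pyGetD s 0 0))).map
      (fun t => PySem.List.pyGetD t 1 0)) ++ [-1]) (fun x => x)).getD 0

-- Source B's counting for-loop over the unsorted tail, with the 'answer' accumulator
def solLoopB (total : Int) (others : List (List Int)) : List (List Int) → Int → Int
  | [], answer => answer
  | s :: rest, answer =>
    if PySem.List.pyGetD s 1 0 ≥ barB others s ∧ s.sum > total then
      solLoopB total others rest (answer + 1)
    else solLoopB total others rest answer

def solution_alt (scores : List (List Int)) : Int :=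
  let target := PySem.List.pyGetD scores 0 []
  let others := PySem.List.slice scores (some 1) none
  let total := target.sum
  if others.any (fun s =>
      decide (PySem.List.pyGetD s 0 0 > PySem.List.pyGetD target 0 0) &&
      decide (PySem.List.pyGetD s 1 0 > PySem.List.pyGetD target 1 0))
  then -1
  else solLoopB total others others 1

-- ===== PRECONDITION & SPEC =====
-- Pre_ excludes exactly the inputs where Python A raises IndexError: empty 'scores'
-- (scores[0]); and, when there is more than one employee, a tail entry with fewer than
-- 2 scores (the sort key raises) or a target with fewer than 2 scores — except the
-- returning case target of length 1 whose first score is never exceeded, where the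
-- 'and' short-circuit keeps target[1] unread in both programs.
def Pre_solution (scores : List (List Int)) : Prop :=
  scores ≠ [] ∧
    (scores.tail = [] ∨
      ((∀ s ∈ scores.tail, 2 ≤ s.length) ∧
        (2 ≤ (scores.headD []).length ∨
          ((scores.headD []).length = 1 ∧
            ∀ s ∈ scores.tail,
              PySem.List.pyGetD s 0 0 ≤ PySem.List.pyGetD (scores.headD []) 0 0))))
instance (scores : List (List Int)) : Decidable (Pre_solution scores) := by
  unfold Pre_solution; infer_instance

def pvWitness_solution : List (List Int) := [[2, 2], [1, 4], [3, 2], [3, 2], [2, 1]]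

def Spec_solution (scores : List (List Int)) (out : Int) : Prop := out = solution_alt scores
instance (scores : List (List Int)) (out : Int) : Decidable (Spec_solution scores out) := by
  unfold Spec_solution; infer_instance

-- ===== CLAIM (what is proved, stated in full; the proofs are below) =====
def Claim_equal_solution : Prop :=
  ∀ (scores : List (List Int)), Dom_solution scores → Pre_solution scores →
    Spec_solution scores (solution scores)

-- ===== LEMMAS AND PROOFS =====

-- the order in which sorted2 with key (-x[0], x[1]) lays out two elements s (earlier), u (later)
def RelA (s u : List Int) : Prop :=
  PySem.List.pyGetD u 0 0 ≤ PySem.List.pyGetD s 0 0 ∧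
    (PySem.List.pyGetD u 0 0 = PySem.List.pyGetD s 0 0 →
      PySem.List.pyGetD s 1 0 ≤ PySem.List.pyGetD u 1 0)

-- the strict lexicographic 'before' test sorted2 uses for these keys
def befA (a b : List Int) : Bool :=
  decide ((fun x => -(PySem.List.pyGetD x 0 0)) a < (fun x => -(PySem.List.pyGetD x 0 0)) b) ||
    (!decide ((fun x => -(PySem.List.pyGetD x 0 0)) b < (fun x => -(PySem.List.pyGetD x 0 0)) a) &&
      decide ((fun x => PySem.List.pyGetD x 1 0) a < (fun x => PySem.List.pyGetD x 1 0) b))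

lemma befA_true {a b : List Int} (h : befA a b = true) : RelA a b := by
  unfold befA at h; unfold RelA
  simp only [Bool.or_eq_true, Bool.and_eq_true, Bool.not_eq_true', decide_eq_true_eq,
    decide_eq_false_iff_not] at h
  constructor <;> [skip; intro he] <;> rcases h with h | ⟨h1, h2⟩ <;> omega

lemma befA_false {a b : List Int} (h : befA a b = false) : RelA b a := by
  unfold befA at h; unfold RelA
  simp only [Bool.or_eq_false_iff, Bool.and_eq_false_iff, Bool.not_eq_false',
    decide_eq_true_eq, decide_eq_false_iff_not] at h
  constructor <;> [skip; intro he] <;> rcases h with ⟨h1, h2 | h2⟩ <;> omega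

lemma relA_trans {a b c : List Int} (h1 : RelA a b) (h2 : RelA b c) : RelA a c := by
  unfold RelA at *; constructor <;> [skip; intro he] <;> omega

lemma insertBy_pairwise_relA (x : List Int) (ys : List (List Int))
    (h : ys.Pairwise RelA) : (PySem.List.insertBy befA x ys).Pairwise RelA := by
  induction ys with
  | nil => simp [PySem.List.insertBy]
  | cons y ys ih =>
    rw [List.pairwise_cons] at h
    unfold PySem.List.insertBy
    by_cases hb : befA x y = true
    · rw [if_pos hb, List.pairwise_cons]
      refine ⟨?_, List.pairwise_cons.mpr h⟩
      intro z hz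
      rcases List.mem_cons.mp hz with rfl | hz'
      · exact befA_true hb
      · exact relA_trans (befA_true hb) (h.1 z hz')
    · rw [if_neg hb, List.pairwise_cons]
      refine ⟨?_, ih h.2⟩
      intro z hz
      rcases (PySem.List.mem_insertBy _ _ _ _).mp hz with rfl | hz'
      · exact befA_false (Bool.not_eq_true _ ▸ hb)
      · exact h.1 z hz'

lemma foldl_insertBy_pairwise_relA (xs acc : List (List Int)) (h : acc.Pairwise RelA) :
    (xs.foldl (fun acc x => PySem.List.insertBy befA x acc) acc).Pairwise RelA := by
  induction xs generalizing acc with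
  | nil => exact h
  | cons x xs ih => exact ih _ (insertBy_pairwise_relA x acc h)

lemma sorted2A_pairwise (l : List (List Int)) :
    (PySem.List.sorted2 l (fun x => -(PySem.List.pyGetD x 0 0))
      (fun x => PySem.List.pyGetD x 1 0)).Pairwise RelA := by
  have : PySem.List.sorted2 l (fun x => -(PySem.List.pyGetD x 0 0))
      (fun x => PySem.List.pyGetD x 1 0) =
      l.foldl (fun acc x => PySem.List.insertBy befA x acc) [] := rfl
  rw [this]
  exact foldl_insertBy_pairwise_relA l [] List.Pairwise.nil

-- the predicate A's loop effectively counts over a list l (relative to threshold m)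
def keptP (total m : Int) (l : List (List Int)) (s : List Int) : Bool :=
  decide (m ≤ PySem.List.pyGetD s 1 0 ∧ total < s.sum ∧
    ∀ t ∈ l, ¬(PySem.List.pyGetD s 0 0 < PySem.List.pyGetD t 0 0 ∧
               PySem.List.pyGetD s 1 0 < PySem.List.pyGetD t 1 0))

-- A's sweep over a sorted list counts exactly the locally-undominated higher-total elements
lemma solLoopA_count (t0 t1 total : Int) (l : List (List Int)) (m a : Int)
    (hnd : ∀ s ∈ l, ¬(PySem.List.pyGetD s 0 0 > t0 ∧ PySem.List.pyGetD s 1 0 > t1))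
    (hp : l.Pairwise RelA) :
    solLoopA t0 t1 total l m a = a + ((l.countP (keptP total m l)) : Int) := by
  induction l generalizing m a with
  | nil => simp [solLoopA]
  | cons s rest ih =>
    rw [List.pairwise_cons] at hp
    have hrel := hp.1
    have hndr : ∀ x ∈ rest, ¬(PySem.List.pyGetD x 0 0 > t0 ∧ PySem.List.pyGetD x 1 0 > t1) :=
      fun x hx => hnd x (List.mem_cons_of_mem _ hx)
    -- nothing in s :: rest strictly dominates s
    have hnds : ∀ t ∈ s :: rest, ¬(PySem.List.pyGetD s 0 0 < PySem.List.pyGetD t 0 0 ∧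
        PySem.List.pyGetD s 1 0 < PySem.List.pyGetD t 1 0) := by
      intro t ht
      rcases List.mem_cons.mp ht with rfl | ht'
      · omega
      · have := hrel t ht'; unfold RelA at this; omega
    unfold solLoopA
    rw [if_neg (hnd s List.mem_cons_self)]
    rw [List.countP_cons]
    by_cases h1 : PySem.List.pyGetD s 1 0 ≥ m
    · rw [if_pos h1]
      have hcongr : ∀ u ∈ rest, keptP total (PySem.List.pyGetD s 1 0) rest u = true ↔
          keptP total m (s :: rest) u = true := by
        intro u hu
        have hr := hrel u hu; unfold RelA at hr
        unfold keptP
        rw [decide_eq_true_eq, decide_eq_true_eq]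
        constructor
        · rintro ⟨ha, hb, hc⟩
          refine ⟨by omega, hb, ?_⟩
          intro t ht
          rcases List.mem_cons.mp ht with rfl | ht'
          · omega
          · exact hc t ht'
        · rintro ⟨ha, hb, hc⟩
          have hs := hc s List.mem_cons_self
          exact ⟨by omega, hb, fun t ht => hc t (List.mem_cons_of_mem _ ht)⟩
      by_cases h2 : s.sum > total
      · rw [if_pos h2, ih _ _ hndr hp.2, List.countP_congr hcongr]
        have : keptP total m (s :: rest) s = true := by
          unfold keptP; exact decide_eq_true ⟨by omega, h2, hnds⟩
        rw [this]; simp; try omega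
      · rw [if_neg h2, ih _ _ hndr hp.2, List.countP_congr hcongr]
        have : keptP total m (s :: rest) s = false := by
          unfold keptP; simp only [decide_eq_false_iff_not]; intro h; exact h2 h.2.1
        rw [this]; simp; try omega
    · rw [if_neg h1]
      have hcongr : ∀ u ∈ rest, keptP total m rest u = true ↔ keptP total m (s :: rest) u = true := by
        intro u hu
        unfold keptP
        rw [decide_eq_true_eq, decide_eq_true_eq]
        constructor
        · rintro ⟨ha, hb, hc⟩
          refine ⟨ha, hb, ?_⟩
          intro t ht
          rcases List.mem_cons.mp ht with rfl | ht'
          · omega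
          · exact hc t ht'
        · rintro ⟨ha, hb, hc⟩
          exact ⟨ha, hb, fun t ht => hc t (List.mem_cons_of_mem _ ht)⟩
      rw [ih _ _ hndr hp.2, List.countP_congr hcongr]
      have : keptP total m (s :: rest) s = false := by
        unfold keptP; simp only [decide_eq_false_iff_not]; intro h; omega
      rw [this]; simp; try omega

-- B's per-element bar test is exactly the keptP predicate at threshold -1
lemma barB_test (others : List (List Int)) (s : List Int) :
    (PySem.List.pyGetD s 1 0 ≥ barB others s) ↔
      (-1 ≤ PySem.List.pyGetD s 1 0 ∧
        ∀ t ∈ others, ¬(PySem.List.pyGetD s 0 0 < PySem.List.pyGetD t 0 0 ∧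
          PySem.List.pyGetD s 1 0 < PySem.List.pyGetD t 1 0)) := by
  unfold barB
  set L := ((others.filter (fun t =>
      decide (PySem.List.pyGetD t 0 0 > PySem.List.pyGetD s 0 0))).map
      (fun t => PySem.List.pyGetD t 1 0)) ++ [-1] with hLdef
  have hne : L ≠ [] := by simp [hLdef]
  obtain ⟨m, hm⟩ : ∃ m, PySem.List.max? L (fun x => x) = some m := by
    cases h : PySem.List.max? L (fun x => x) with
    | none => exact absurd ((PySem.List.max?_eq_none_iff ..).mp h) hne
    | some m => exact ⟨m, rfl⟩
  have hmem := PySem.List.max?_mem hm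
  have hmax := PySem.List.max?_isMax hm
  rw [hm]
  simp only [Option.getD_some]
  have hmemL : ∀ y, y ∈ L ↔ (y = -1 ∨ ∃ t ∈ others,
      PySem.List.pyGetD s 0 0 < PySem.List.pyGetD t 0 0 ∧ y = PySem.List.pyGetD t 1 0) := by
    intro y
    rw [hLdef]
    simp only [List.mem_append, List.mem_map, List.mem_filter, List.mem_singleton,
      decide_eq_true_eq, gt_iff_lt]
    constructor
    · rintro (⟨t, ⟨ht, hgt⟩, rfl⟩ | rfl)
      · exact Or.inr ⟨t, ht, hgt, rfl⟩
      · exact Or.inl rfl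
    · rintro (rfl | ⟨t, ht, hgt, rfl⟩)
      · exact Or.inr rfl
      · exact Or.inl ⟨t, ⟨ht, hgt⟩, rfl⟩
  constructor
  · intro hge
    constructor
    · have : (-1 : Int) ∈ L := (hmemL _).mpr (Or.inl rfl)
      have := hmax _ this
      omega
    · intro t ht hd
      have : PySem.List.pyGetD t 1 0 ∈ L := (hmemL _).mpr (Or.inr ⟨t, ht, hd.1, rfl⟩)
      have := hmax _ this
      omega
  · rintro ⟨h1, h2⟩
    rcases (hmemL m).mp hmem with rfl | ⟨t, ht, hgt, rfl⟩
    · omega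
    · by_contra hlt
      exact h2 t ht ⟨hgt, by omega⟩

-- B's loop counts keptP at threshold -1 over the whole tail
lemma solLoopB_count (total : Int) (others : List (List Int)) (l : List (List Int)) (a : Int) :
    solLoopB total others l a = a + ((l.countP (keptP total (-1) others)) : Int) := by
  induction l generalizing a with
  | nil => simp [solLoopB]
  | cons s rest ih =>
    unfold solLoopB
    rw [List.countP_cons]
    by_cases h : PySem.List.pyGetD s 1 0 ≥ barB others s ∧ s.sum > total
    · rw [if_pos h, ih]
      have : keptP total (-1) others s = true := by
        unfold keptP
        exact decide_eq_true ⟨((barB_test others s).mp h.1).1, h.2,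
          ((barB_test others s).mp h.1).2⟩
      rw [this]; simp; try omega
    · rw [if_neg h, ih]
      have : keptP total (-1) others s = false := by
        unfold keptP
        simp only [decide_eq_false_iff_not]
        rintro ⟨ha, hb, hc⟩
        exact h ⟨(barB_test others s).mpr ⟨ha, hc⟩, hb⟩
      rw [this]; simp; try omega

-- ===== VERDICT (by name: the statement is the Claim_ definition above) =====
theorem solution_spec : Claim_equal_solution := by
  intro scores _ _
  unfold Spec_solution solution solution_alt
  simp only []
  set L := PySem.List.slice scores (some 1) none with hL
  set target := PySem.List.pyGetD scores 0 [] with ht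
  set S := PySem.List.sorted2 L (fun x => -(PySem.List.pyGetD x 0 0))
      (fun x => PySem.List.pyGetD x 1 0) with hS
  have hperm : S.Perm L := PySem.List.sorted2_perm ..
  by_cases hany : ∃ s ∈ L, PySem.List.pyGetD s 0 0 > PySem.List.pyGetD target 0 0 ∧
      PySem.List.pyGetD s 1 0 > PySem.List.pyGetD target 1 0
  · -- target dominated: both return -1
    obtain ⟨x, hx, hd⟩ := hany
    have hB : L.any (fun s =>
        decide (PySem.List.pyGetD s 0 0 > PySem.List.pyGetD target 0 0) &&
        decide (PySem.List.pyGetD s 1 0 > PySem.List.pyGetD target 1 0)) = true :=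
      List.any_eq_true.mpr ⟨x, hx, by
        simp only [Bool.and_eq_true, decide_eq_true_eq]; exact ⟨hd.1, hd.2⟩⟩
    rw [if_pos hB]
    -- A's loop hits the dominating element and returns -1
    have : ∀ (l : List (List Int)) (m a : Int),
        (∃ s ∈ l, PySem.List.pyGetD s 0 0 > PySem.List.pyGetD target 0 0 ∧
          PySem.List.pyGetD s 1 0 > PySem.List.pyGetD target 1 0) →
        solLoopA (PySem.List.pyGetD target 0 0) (PySem.List.pyGetD target 1 0)
          target.sum l m a = -1 := by
      intro l
      induction l with
      | nil => intro m a h; simp at h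
      | cons s rest ih =>
        intro m a h
        obtain ⟨y, hy, hdy⟩ := h
        rcases List.mem_cons.mp hy with rfl | hmem
        · unfold solLoopA
          rw [if_pos hdy]
        · unfold solLoopA
          split_ifs
          · rfl
          all_goals exact ih _ _ ⟨y, hmem, hdy⟩
    exact this _ _ _ ⟨x, hperm.mem_iff.mpr hx, hd⟩
  · -- target undominated: both count keptP at threshold -1 over the tail
    have hB : L.any (fun s =>
        decide (PySem.List.pyGetD s 0 0 > PySem.List.pyGetD target 0 0) &&
        decide (PySem.List.pyGetD s 1 0 > PySem.List.pyGetD target 1 0)) = false := by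
      rw [List.any_eq_false]
      intro x hx
      simp only [Bool.and_eq_true, decide_eq_true_eq, not_and]
      intro h1 h2
      exact hany ⟨x, hx, h1, h2⟩
    rw [if_neg (by simp [hB])]
    have hndS : ∀ s ∈ S, ¬(PySem.List.pyGetD s 0 0 > PySem.List.pyGetD target 0 0 ∧
        PySem.List.pyGetD s 1 0 > PySem.List.pyGetD target 1 0) :=
      fun s hs hd => hany ⟨s, hperm.mem_iff.mp hs, hd⟩
    rw [solLoopA_count _ _ _ _ _ _ hndS (sorted2A_pairwise L), solLoopB_count]
    -- keptP only mentions membership of the list argument, so S may be replaced by L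
    have hcongr : ∀ u ∈ S, keptP target.sum (-1) S u = true ↔
        keptP target.sum (-1) L u = true := by
      intro u _
      unfold keptP
      rw [decide_eq_true_eq, decide_eq_true_eq]
      constructor <;> rintro ⟨ha, hb, hc⟩ <;>
        exact ⟨ha, hb, fun t ht => hc t (by rw [hperm.mem_iff] at *; exact ht)⟩
    rw [List.countP_congr hcongr, hperm.countP_eq]
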